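-- pv_equiv track=rewrite | github.com/vvoelz/HPSandbox | scripts/HelperTools.py | vec2coords
-- ===== SOURCE A (Python) =====
-- def vec2coords(thisvec):
--     """Convert a list of chain vectors to a list of coordinates (duples)."""
--     tmp = [(0,0)]
--     x = 0
--     y = 0
--     for i in range(0,len(thisvec)):
--         if thisvec[i] == 0:
--             y = y + 1
--         if thisvec[i] == 1:
--             x = x + 1
--         if thisvec[i] == 2:
--             y = y - 1
--         if thisvec[i] == 3:
--             x = x - 1
--         tmp.append((x,y))
--     return tmp
-- ===== SOURCE B (Python) =====
-- _DELTA = {0: (0, 1), 1: (1, 0), 2: (0, -1), 3: (-1, 0)}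
--
-- def vec2coords(thisvec):
--     """Convert a list of chain vectors to a list of coordinates (duples).
--
--     Divide and conquer: the path of the whole vector is the path of the
--     left half followed by the path of the right half translated by the
--     left path's endpoint."""
--     if len(thisvec) <= 1:
--         if not thisvec:
--             return [(0, 0)]
--         return [(0, 0), _DELTA.get(thisvec[0], (0, 0))]
--     m = len(thisvec) // 2
--     left = vec2coords(thisvec[:m])
--     right = vec2coords(thisvec[m:])
--     ox, oy = left[-1]
--     return left + [(ox + x, oy + y) for (x, y) in right[1:]]
-- ===== Notes on version B (the rewrite author's own statement) =====
-- stated objective: alternative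
-- what changed: Replaces the single-pass if-chain accumulator with a divide-and-conquer scheme: recursively build the paths of the two halves and append the right path translated by the left path's endpoint.
import Mathlib
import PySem

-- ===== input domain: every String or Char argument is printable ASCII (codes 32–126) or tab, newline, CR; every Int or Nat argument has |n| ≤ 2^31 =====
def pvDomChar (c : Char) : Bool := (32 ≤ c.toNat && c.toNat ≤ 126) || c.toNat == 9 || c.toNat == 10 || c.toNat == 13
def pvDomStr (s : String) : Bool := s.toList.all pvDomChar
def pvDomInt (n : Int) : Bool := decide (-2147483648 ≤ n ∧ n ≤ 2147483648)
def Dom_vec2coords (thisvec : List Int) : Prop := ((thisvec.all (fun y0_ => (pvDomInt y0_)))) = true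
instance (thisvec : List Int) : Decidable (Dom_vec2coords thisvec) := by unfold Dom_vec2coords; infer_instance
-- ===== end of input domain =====

-- B replaces A's single-pass if-chain accumulator with divide and conquer
-- (left-half path ++ right-half path translated by the left endpoint); objective: alternative.
-- ===== PORT A =====
-- loop state: current (x,y) and the accumulated list tmp; the four ifs in order
def vec2coordsStep (st : (Int × Int) × List (Int × Int)) (d : Int) : (Int × Int) × List (Int × Int) :=
  let x := st.1.1
  let y := st.1.2
  let y := if d = 0 then y + 1 else y
  let x := if d = 1 then x + 1 else x
  let y := if d = 2 then y - 1 else y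
  let x := if d = 3 then x - 1 else x
  ((x, y), st.2 ++ [(x, y)])

def vec2coords (thisvec : List Int) : List (Int × Int) :=
  (thisvec.foldl vec2coordsStep ((0, 0), [(0, 0)])).2

-- ===== PORT B =====
-- _DELTA.get(d, (0,0))
def vec2coordsDelta (d : Int) : Int × Int :=
  if d = 0 then (0, 1) else if d = 1 then (1, 0) else if d = 2 then (0, -1)
  else if d = 3 then (-1, 0) else (0, 0)

def vec2coords_alt (thisvec : List Int) : List (Int × Int) :=
  if thisvec.length ≤ 1 then
    match thisvec with
    | [] => [(0, 0)]
    | d :: _ => [(0, 0), vec2coordsDelta d]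
  else
    let m := thisvec.length / 2
    let left := vec2coords_alt (thisvec.take m)
    let right := vec2coords_alt (thisvec.drop m)
    -- left[-1]; left (a recursive result) is always nonempty, so this is its last element
    let o := left.getLastD (0, 0)
    left ++ (right.drop 1).map (fun p => (o.1 + p.1, o.2 + p.2))
termination_by thisvec.length
decreasing_by
  · simp only [List.length_take]; omega
  · simp only [List.length_drop]; omega

-- ===== PRECONDITION & SPEC =====
def Spec_vec2coords (thisvec : List Int) (out : List (Int × Int)) : Prop := out = vec2coords_alt thisvec
instance (thisvec : List Int) (out : List (Int × Int)) : Decidable (Spec_vec2coords thisvec out) := by unfold Spec_vec2coords; infer_instance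

-- ===== CLAIM (what is proved, stated in full; the proofs are below) =====
def Claim_equal_vec2coords : Prop := ∀ (thisvec : List Int), Dom_vec2coords thisvec → Spec_vec2coords thisvec (vec2coords thisvec)

-- ===== LEMMAS AND PROOFS =====
-- canonical form: the path starting at p
def pathFrom (p : Int × Int) : List Int → List (Int × Int)
  | [] => [p]
  | d :: t => p :: pathFrom (p.1 + (vec2coordsDelta d).1, p.2 + (vec2coordsDelta d).2) t

def vecAdd (p q : Int × Int) : Int × Int := (p.1 + q.1, p.2 + q.2)

lemma step_eq (st : (Int × Int) × List (Int × Int)) (d : Int) :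
    vec2coordsStep st d =
      (vecAdd st.1 (vec2coordsDelta d), st.2 ++ [vecAdd st.1 (vec2coordsDelta d)]) := by
  unfold vec2coordsStep vec2coordsDelta vecAdd
  split_ifs <;> simp_all <;> omega

lemma pathFrom_cons (p : Int × Int) (v : List Int) :
    ∃ t, pathFrom p v = p :: t := by
  cases v <;> simp [pathFrom]

lemma fold_path (v : List Int) : ∀ (p : Int × Int) (acc : List (Int × Int)),
    (v.foldl vec2coordsStep (p, acc ++ [p])).2 = acc ++ pathFrom p v := by
  induction v with
  | nil => intro p acc; simp [pathFrom]
  | cons d t ih =>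
      intro p acc
      have h := step_eq (p, acc ++ [p]) d
      simp only [List.foldl_cons, h, pathFrom]
      have : acc ++ [p] ++ [vecAdd p (vec2coordsDelta d)]
          = (acc ++ [p]) ++ [vecAdd p (vec2coordsDelta d)] := by simp
      rw [this, ih (vecAdd p (vec2coordsDelta d)) (acc ++ [p])]
      simp [vecAdd]

lemma A_eq_path (v : List Int) : vec2coords v = pathFrom (0, 0) v := by
  have := fold_path v (0, 0) []
  simpa [vec2coords] using this

lemma pathFrom_shift (v : List Int) : ∀ (a b c e : Int),
    pathFrom (a + c, b + e) v = (pathFrom (c, e) v).map (fun r => (a + r.1, b + r.2)) := by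
  induction v with
  | nil => intro a b c e; simp [pathFrom]
  | cons d t ih =>
      intro a b c e
      simp only [pathFrom, List.map_cons]
      congr 1
      have h2 : ((a + c + (vec2coordsDelta d).1, b + e + (vec2coordsDelta d).2) : Int × Int)
          = (a + (c + (vec2coordsDelta d).1), b + (e + (vec2coordsDelta d).2)) := by
        simp [Prod.ext_iff]; omega
      rw [h2, ih]

lemma pathFrom_getLastD_cons (p q : Int × Int) (v : List Int) (d : Int × Int) :
    (q :: pathFrom p v).getLastD d = (pathFrom p v).getLastD d := by
  obtain ⟨t, ht⟩ := pathFrom_cons p v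
  rw [ht]; rfl

lemma pathFrom_split (u : List Int) : ∀ (w : List Int) (p : Int × Int),
    pathFrom p (u ++ w)
      = pathFrom p u ++ (pathFrom ((pathFrom p u).getLastD (0, 0)) w).drop 1 := by
  induction u with
  | nil =>
      intro w p
      obtain ⟨t, ht⟩ := pathFrom_cons p w
      simp [pathFrom, ht]
  | cons d t ih =>
      intro w p
      simp only [List.cons_append, pathFrom]
      rw [ih w]
      rw [pathFrom_getLastD_cons]

lemma B_eq_path_aux (n : Nat) : ∀ (v : List Int), v.length ≤ n →
    vec2coords_alt v = pathFrom (0, 0) v := by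
  induction n with
  | zero =>
      intro v hv
      have : v = [] := by cases v <;> simp_all
      subst this; simp [vec2coords_alt, pathFrom]
  | succ n ih =>
      intro v hv
      by_cases h1 : v.length ≤ 1
      · cases v with
        | nil => simp [vec2coords_alt, pathFrom]
        | cons d t =>
            have : t = [] := by cases t <;> simp_all
            subst this
            simp [vec2coords_alt, pathFrom]
      · rw [vec2coords_alt.eq_def]
        simp only [if_neg h1]
        have hm : v.length / 2 < v.length := by omega
        have htake : (v.take (v.length / 2)).length ≤ n := by
          simp only [List.length_take]; omega
        have hdrop : (v.drop (v.length / 2)).length ≤ n := by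
          simp only [List.length_drop]; omega
        rw [ih _ htake, ih _ hdrop]
        have hsplit := pathFrom_split (v.take (v.length / 2)) (v.drop (v.length / 2)) ((0 : Int), (0 : Int))
        rw [List.take_append_drop] at hsplit
        rw [hsplit]
        congr 1
        set o := (pathFrom ((0 : Int), (0 : Int)) (v.take (v.length / 2))).getLastD (0, 0) with ho
        have hz : ((o.1 + (0 : Int), o.2 + (0 : Int)) : Int × Int) = o := by simp
        rw [show pathFrom o (v.drop (v.length / 2))
              = pathFrom (o.1 + 0, o.2 + 0) (v.drop (v.length / 2)) by rw [hz]]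
        rw [pathFrom_shift (v.drop (v.length / 2)) o.1 o.2 0 0]
        simp

lemma B_eq_path (v : List Int) : vec2coords_alt v = pathFrom (0, 0) v :=
  B_eq_path_aux v.length v le_rfl

-- ===== VERDICT (by name: the statement is the Claim_ definition above) =====
theorem vec2coords_spec : Claim_equal_vec2coords := by
  intro v _
  unfold Spec_vec2coords
  rw [A_eq_path, B_eq_path]
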